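-- pv_equiv track=rewrite | github.com/SergioAle210/Generate-Lex | yalex_parser.py | convert_optional_operator
-- ===== SOURCE A (Python) =====
-- def convert_optional_operator(expr: str) -> str:
--     r"""
--     Convierte el operador '?' (opcional) a su forma equivalente:
--       R?  -->  (R§_)
--     donde "§" es un separador especial (que luego se reemplazará por "|" en el resultado final)
--     y "_" representa la cadena vacía.
--
--     Se asume que '?' es un operador postfix aplicado al operando inmediatamente anterior.
--     Si el '?' está escapado (precedido de "\"), se deja como literal.
--     """
--     output = ""
--     i = 0
--     while i < len(expr):
--         if expr[i] == "?":
--             if i > 0 and expr[i - 1] == "\\":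
--                 output += "?"
--                 i += 1
--                 continue
--             # Si el operando es un grupo (termina en ")")
--             if output and output[-1] == ")":
--                 count = 1
--                 j = len(output) - 2
--                 while j >= 0:
--                     if output[j] == ")":
--                         count += 1
--                     elif output[j] == "(":
--                         count -= 1
--                         if count == 0:
--                             break
--                     j -= 1
--                 operand = output[j:]  # desde el '(' correspondiente hasta el final
--                 output = output[:j]  # eliminamos el operando de output
--                 # Se genera el grupo opcional usando el separador especial "§"
--                 transformed = "(" + operand + "§_)"
--                 output += transformed
--             else:
--                 # Caso: operando de un solo carácter
--                 if output:
--                     operand = output[-1]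
--                     output = output[:-1]
--                     transformed = "(" + operand + "§_)"
--                     output += transformed
--                 else:
--                     output += "§_"
--             i += 1
--         else:
--             output += expr[i]
--             i += 1
--     return output
-- ===== SOURCE B (Python) =====
-- def convert_optional_operator(expr: str) -> str:
--     # One forward pass: a list buffer plus a stack of unmatched '(' indices,
--     # so the operand group of each '?' is found in O(1) instead of a backward rescan.
--     buf = []
--     stack = []          # indices of currently unmatched '(' in buf (increasing)
--     ml = None           # matcher index of the most recently appended ')'
--
--     def put(s):
--         nonlocal ml
--         for ch in s:
--             if ch == '(':
--                 stack.append(len(buf))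
--             elif ch == ')':
--                 ml = stack.pop() if stack else None
--             buf.append(ch)
--
--     prev = None
--     for ch in expr:
--         if ch == '?' and prev != '\\':
--             if buf and buf[-1] == ')' and ml is not None:
--                 j = ml
--                 buf.insert(j, '(')       # segment buf[j:] is balanced: stack indices are all < j
--                 buf.append('\u00a7'); buf.append('_'); buf.append(')')
--                 ml = j
--             elif buf:
--                 c = buf.pop()
--                 if c == '(':
--                     stack.pop()          # the popped '(' was the top unmatched one
--                 put('(' + c + '\u00a7_)')
--             else:
--                 put('\u00a7_')
--         else:
--             put(ch)
--         prev = ch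
--     return ''.join(buf)
-- ===== Notes on version B (the rewrite author's own statement) =====
-- stated objective: faster
-- what changed: A rescans the output backwards to find the matching '(' and rebuilds the output string by slicing at every '?'; B makes one forward pass over a list buffer maintaining a stack of unmatched '(' positions and the matcher of the last ')', so each '?' finds its operand group in O(1).
import Mathlib
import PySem

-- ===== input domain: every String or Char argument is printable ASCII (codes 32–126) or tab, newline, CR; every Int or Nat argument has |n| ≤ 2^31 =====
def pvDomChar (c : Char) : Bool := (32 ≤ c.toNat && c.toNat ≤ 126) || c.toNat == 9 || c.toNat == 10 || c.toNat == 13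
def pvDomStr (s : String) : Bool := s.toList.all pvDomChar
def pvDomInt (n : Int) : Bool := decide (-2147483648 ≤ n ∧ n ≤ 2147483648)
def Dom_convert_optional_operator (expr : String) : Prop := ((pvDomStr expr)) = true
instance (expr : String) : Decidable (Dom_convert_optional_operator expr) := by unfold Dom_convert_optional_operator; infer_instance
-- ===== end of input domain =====

-- B replaces A's backward paren-rescan per '?' by one forward pass with a stack of open-paren
-- positions (objective: faster; the rescans and string-slicing copies disappear).

-- ===== PORT A =====
-- the inner backward while-loop of A: fuel = j+1 (current index j = fuel-1); returns j, or -1 when j reaches -1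
def aScan (out : List Char) : Int → Nat → Int
  | _, 0 => -1
  | count, f + 1 =>
    if out.getD f ' ' = ')' then aScan out (count + 1) f
    else if out.getD f ' ' = '(' then
      (if count - 1 = 0 then (f : Int) else aScan out (count - 1) f)
    else aScan out count f

-- the outer while-loop of A: rest = expr[i:], prev = expr[i-1] (none at i = 0), out = output
def aLoop : List Char → Option Char → List Char → List Char
  | [], _, out => out
  | c :: rest, prev, out =>
    if c = '?' then
      if prev = some '\\' then aLoop rest (some '?') (out ++ ['?'])
      else if out.getLast? = some ')' then
        let r := aScan out 1 (out.length - 1)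
        let operand := PySem.List.slice out (some r) none            -- output[j:]  (j may be -1)
        let kept := PySem.List.slice out none (some r)               -- output[:j]
        aLoop rest (some '?') (kept ++ ('(' :: operand ++ ['§', '_', ')']))
      else if out ≠ [] then
        let operand := out.getLast?.getD ' '                          -- output[-1], out ≠ []
        aLoop rest (some '?') (out.dropLast ++ ['(', operand, '§', '_', ')'])
      else aLoop rest (some '?') (out ++ ['§', '_'])
    else aLoop rest (some c) (out ++ [c])

def convert_optional_operator (expr : String) : String :=
  String.mk (aLoop expr.toList none [])

-- ===== PORT B =====
-- B's put(s): append chars maintaining (buffer, stack of unmatched '(' indices, matcher of last ')')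
def bPut : List Char × List Nat × Option Nat → List Char → List Char × List Nat × Option Nat
  | st, [] => st
  | (out, stack, ml), c :: cs =>
    if c = '(' then bPut (out ++ [c], out.length :: stack, ml) cs
    else if c = ')' then
      match stack with
      | [] => bPut (out ++ [c], [], none) cs
      | t :: st' => bPut (out ++ [c], st', some t) cs
    else bPut (out ++ [c], stack, ml) cs

-- B's single forward pass
def bLoop : List Char → Option Char → List Char × List Nat × Option Nat → List Char × List Nat × Option Nat
  | [], _, st => st
  | c :: rest, prev, (out, stack, ml) =>
    if c = '?' ∧ prev ≠ some '\\' then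
      if out.getLast? = some ')' ∧ ml ≠ none then
        let j := ml.getD 0
        -- buf.insert(j,'('); buf += "§_)"; stack unchanged (all entries < j); ml = j
        bLoop rest (some '?') (out.take j ++ '(' :: out.drop j ++ ['§', '_', ')'], stack, some j)
      else if out ≠ [] then
        let c0 := out.getLast?.getD ' '
        let stack' := if c0 = '(' then stack.tail else stack
        bLoop rest (some '?') (bPut (out.dropLast, stack', ml) ['(', c0, '§', '_', ')'])
      else bLoop rest (some '?') (bPut (out, stack, ml) ['§', '_'])
    else bLoop rest (some c) (bPut (out, stack, ml) [c])

def convert_optional_operator_alt (expr : String) : String :=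
  String.mk (bLoop expr.toList none ([], [], none)).1

-- ===== PRECONDITION & SPEC =====
def Spec_convert_optional_operator (expr : String) (out : String) : Prop := out = convert_optional_operator_alt expr
instance (expr : String) (out : String) : Decidable (Spec_convert_optional_operator expr out) := by unfold Spec_convert_optional_operator; infer_instance

-- ===== CLAIM (what is proved, stated in full; the proofs are below) =====
def Claim_equal_convert_optional_operator : Prop := ∀ (expr : String), Dom_convert_optional_operator expr → Spec_convert_optional_operator expr (convert_optional_operator expr)

-- ===== LEMMAS AND PROOFS =====

-- the canonical paren scan: runS n S m s = (stack, ml) after reading s from base index n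
def runS : Nat → List Nat → Option Nat → List Char → List Nat × Option Nat
  | _, S, m, [] => (S, m)
  | n, S, m, c :: s =>
    if c = '(' then runS (n + 1) (n :: S) m s
    else if c = ')' then
      match S with
      | [] => runS (n + 1) [] none s
      | t :: S' => runS (n + 1) S' (some t) s
    else runS (n + 1) S m s

lemma bPut_spec : ∀ (s out : List Char) (S : List Nat) (m : Option Nat),
    bPut (out, S, m) s = (out ++ s, runS out.length S m s) := by
  intro s
  induction s with
  | nil => intro out S m; simp [bPut, runS]
  | cons c cs ih =>
    intro out S m
    by_cases h1 : c = '('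
    · simp [bPut, runS, h1, ih]
    · by_cases h2 : c = ')'
      · cases S with
        | nil => simp [bPut, runS, h1, h2, ih]
        | cons t S' => simp [bPut, runS, h1, h2, ih]
      · simp [bPut, runS, h1, h2, ih]

lemma runS_append : ∀ (xs ys : List Char) (n : Nat) (S : List Nat) (m : Option Nat),
    runS n S m (xs ++ ys) = runS (n + xs.length) (runS n S m xs).1 (runS n S m xs).2 ys := by
  intro xs
  induction xs with
  | nil => intro ys n S m; simp [runS]
  | cons c cs ih =>
    intro ys n S m
    by_cases h1 : c = '('
    · simp [runS, h1, ih]; ring_nf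
    · by_cases h2 : c = ')'
      · cases S with
        | nil => simp [runS, h1, h2, ih]; ring_nf
        | cons t S' => simp [runS, h1, h2, ih]; ring_nf
      · simp [runS, h1, h2, ih]; ring_nf

lemma runS_ml_irrel : ∀ (s : List Char) (n : Nat) (S : List Nat) (m₁ m₂ : Option Nat),
    ')' ∈ s → runS n S m₁ s = runS n S m₂ s := by
  intro s
  induction s with
  | nil => intro n S m1 m2 h; simp at h
  | cons c cs ih =>
    intro n S m1 m2 h
    by_cases h1 : c = '('
    · have hc : ')' ∈ cs := by
        rcases List.mem_cons.mp h with h' | h'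
        · exact absurd h'.symm (by simp [h1])
        · exact h'
      simp only [runS, if_pos h1]
      exact ih _ _ _ _ hc
    · by_cases h2 : c = ')'
      · cases S with
        | nil => simp [runS, h1, h2]
        | cons t S' => simp [runS, h1, h2]
      · have hc : ')' ∈ cs := by
          rcases List.mem_cons.mp h with h' | h'
          · exact absurd h'.symm (by simp [h2])
          · exact h'
        simp only [runS, if_neg h1, if_neg h2]
        exact ih _ _ _ _ hc

-- stack effect of a segment in isolation: own pushes X plus a count p of pops taken from below
def runE : Nat → List Nat → Nat → List Char → List Nat × Nat
  | _, X, p, [] => (X, p)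
  | n, X, p, c :: s =>
    if c = '(' then runE (n + 1) (n :: X) p s
    else if c = ')' then
      match X with
      | [] => runE (n + 1) [] (p + 1) s
      | _ :: X' => runE (n + 1) X' p s
    else runE (n + 1) X p s

lemma runE_runS : ∀ (s : List Char) (n : Nat) (X : List Nat) (p : Nat) (S : List Nat) (m : Option Nat),
    (runS n (X ++ S.drop p) m s).1 = (runE n X p s).1 ++ S.drop (runE n X p s).2 := by
  intro s
  induction s with
  | nil => intro n X p S m; simp [runS, runE]
  | cons c cs ih =>
    intro n X p S m
    by_cases h1 : c = '('
    · simpa [runS, runE, h1] using ih (n+1) (n :: X) p S m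
    · by_cases h2 : c = ')'
      · cases X with
        | nil =>
          rcases hd : S.drop p with _ | ⟨t, ts⟩
          · have hd1 : S.drop (p+1) = [] := by
              rw [List.drop_add_one_eq_tail_drop, hd]; rfl
            simp only [runS, runE, h1, h2, hd, if_neg (by decide : ¬ (')' : Char) = '('), if_pos rfl,
              List.append_nil]
            have := ih (n+1) [] (p+1) S none
            simpa [hd1] using this
          · have hd1 : S.drop (p+1) = ts := by
              rw [List.drop_add_one_eq_tail_drop, hd]; rfl
            simp only [runS, runE, h1, h2, hd, if_neg (by decide : ¬ (')' : Char) = '('), if_pos rfl,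
              List.nil_append]
            have := ih (n+1) [] (p+1) S (some t)
            simpa [hd1] using this
        | cons x X' =>
          simpa [runS, runE, h1, h2] using ih (n+1) X' p S (some x)
      · simpa [runS, runE, h1, h2] using ih (n+1) X p S m

lemma runE_shift : ∀ (s : List Char) (n : Nat) (X : List Nat) (p : Nat),
    runE (n + 1) (X.map (· + 1)) p s = ((runE n X p s).1.map (· + 1), (runE n X p s).2) := by
  intro s
  induction s with
  | nil => intro n X p; simp [runE]
  | cons c cs ih =>
    intro n X p
    by_cases h1 : c = '('
    · have := ih (n+1) (n :: X) p
      simpa [runE, h1, List.map_cons] using this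
    · by_cases h2 : c = ')'
      · cases X with
        | nil => simpa [runE, h1, h2] using ih (n+1) [] (p+1)
        | cons x X' => simpa [runE, h1, h2, List.map_cons] using ih (n+1) X' p
      · simpa [runE, h1, h2] using ih (n+1) X p

lemma runE_mem : ∀ (s : List Char) (n : Nat) (X : List Nat) (p : Nat) (j : Nat),
    j ∈ (runE n X p s).1 → j ∈ X ∨ (n ≤ j ∧ j < n + s.length ∧ s.getD (j - n) ' ' = '(') := by
  intro s
  induction s with
  | nil => intro n X p j h; simp [runE] at h; exact Or.inl h
  | cons c cs ih =>
    intro n X p j h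
    by_cases h1 : c = '('
    · simp only [runE, if_pos h1] at h
      rcases ih (n+1) (n :: X) p j h with h' | h'
      · rcases List.mem_cons.mp h' with rfl | h''
        · right
          refine ⟨le_refl _, by simp, ?_⟩
          simp [h1]
        · exact Or.inl h''
      · right
        obtain ⟨hj1, hj2, hj3⟩ := h'
        refine ⟨by omega, by simp; omega, ?_⟩
        have : j - n = (j - (n+1)) + 1 := by omega
        rw [this]
        simpa using hj3
    · by_cases h2 : c = ')'
      · cases X with
        | nil =>
          simp only [runE, if_neg h1, if_pos h2] at h
          rcases ih (n+1) [] (p+1) j h with h' | h'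
          · simp at h'
          · right
            obtain ⟨hj1, hj2, hj3⟩ := h'
            refine ⟨by omega, by simp; omega, ?_⟩
            have : j - n = (j - (n+1)) + 1 := by omega
            rw [this]; simpa using hj3
        | cons x X' =>
          simp only [runE, if_neg h1, if_pos h2] at h
          rcases ih (n+1) X' p j h with h' | h'
          · exact Or.inl (List.mem_cons_of_mem _ h')
          · right
            obtain ⟨hj1, hj2, hj3⟩ := h'
            refine ⟨by omega, by simp; omega, ?_⟩
            have : j - n = (j - (n+1)) + 1 := by omega
            rw [this]; simpa using hj3
      · simp only [runE, if_neg h1, if_neg h2] at h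
        rcases ih (n+1) X p j h with h' | h'
        · exact Or.inl h'
        · right
          obtain ⟨hj1, hj2, hj3⟩ := h'
          refine ⟨by omega, by simp; omega, ?_⟩
          have : j - n = (j - (n+1)) + 1 := by omega
          rw [this]; simpa using hj3

lemma aScan_prefix : ∀ (f : Nat) (l t : List Char) (k : Int),
    f ≤ l.length → aScan (l ++ t) k f = aScan l k f := by
  intro f
  induction f with
  | zero => intro l t k h; simp [aScan]
  | succ f ih =>
    intro l t k h
    have hg : (l ++ t).getD f ' ' = l.getD f ' ' := by
      rw [List.getD_append]
      omega
    rw [aScan, aScan, hg]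
    split_ifs with h1 h2 h3 <;> first
      | rfl
      | exact ih l t _ (by omega)

-- A's backward scan with count k+1 finds the (k+1)-st unmatched '(' from the right
lemma aScan_eq : ∀ (w : List Char) (k : Nat),
    aScan w ((k : Int) + 1) w.length =
      (match (runS 0 [] none w).1[k]? with | some j => (j : Int) | none => -1) := by
  intro w
  induction w using List.reverseRecOn with
  | nil => intro k; simp [aScan, runS]
  | append_singleton l c ih =>
    intro k
    have hlen : (l ++ [c]).length = l.length + 1 := by simp
    have hget : (l ++ [c]).getD l.length ' ' = c := by
      simp [List.getD]
    have hrun : runS 0 [] none (l ++ [c]) =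
        runS l.length (runS 0 [] none l).1 (runS 0 [] none l).2 [c] := by
      simpa using runS_append l [c] 0 [] none
    rw [hlen]
    by_cases h2 : c = ')'
    · have hstep : aScan (l ++ [c]) ((k : Int) + 1) (l.length + 1) =
          aScan l (((k + 1 : Nat) : Int) + 1) l.length := by
        rw [aScan, hget, if_pos h2, aScan_prefix _ _ _ _ (le_refl _)]
        norm_num
      rw [hstep, ih (k + 1), hrun, h2]
      rcases hS : (runS 0 [] none l).1 with _ | ⟨t, S'⟩
      · simp [runS, hS]
      · simp [runS, hS]
    · by_cases h1 : c = '('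
      · rcases k with _ | k'
        · have : aScan (l ++ [c]) (((0 : Nat) : Int) + 1) (l.length + 1) = (l.length : Int) := by
            rw [aScan, hget, if_neg (h1 ▸ (by decide : ¬ ('(' : Char) = ')')), if_pos h1]
            norm_num
          rw [this, hrun, h1]
          simp [runS]
        · have hstep : aScan (l ++ [c]) (((k' + 1 : Nat) : Int) + 1) (l.length + 1) =
              aScan l (((k' : Nat) : Int) + 1) l.length := by
            rw [aScan, hget, if_neg (h1 ▸ (by decide : ¬ ('(' : Char) = ')')), if_pos h1,
              if_neg (by push_cast; omega), aScan_prefix _ _ _ _ (le_refl _)]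
            norm_num
          rw [hstep, ih k', hrun, h1]
          simp [runS]
      · have hstep : aScan (l ++ [c]) ((k : Int) + 1) (l.length + 1) =
            aScan l ((k : Int) + 1) l.length := by
          rw [aScan, hget, if_neg h2, if_neg h1, aScan_prefix _ _ _ _ (le_refl _)]
        rw [hstep, ih k, hrun]
        simp [runS, h1, h2]


-- the group-wrap step: inserting '(' at the matcher j and appending "§_)" keeps the stack and sets ml = j
lemma group_lemma : ∀ (dL : List Char) (j : Nat) (S' : List Nat),
    (runS 0 [] none dL).1 = j :: S' →
    runS 0 [] none ((dL ++ [')']).take j ++ '(' :: (dL ++ [')']).drop j ++ ['§', '_', ')']) = (S', some j) := by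
  intro dL j S' h
  -- the head j of the stack is an in-range '(' of dL
  have hstk : (runS 0 [] none dL).1 = (runE 0 [] 0 dL).1 := by
    simpa using runE_runS dL 0 [] 0 [] none
  have hjmem : j ∈ (runE 0 [] 0 dL).1 := by rw [← hstk, h]; exact List.mem_cons_self
  have hj : j < dL.length ∧ dL.getD j ' ' = '(' := by
    rcases runE_mem dL 0 [] 0 j hjmem with h' | h'
    · simp at h'
    · exact ⟨by omega, by simpa using h'.2.2⟩
  obtain ⟨hjlen, hjget⟩ := hj
  have hjget' : dL[j] = '(' := by rw [← List.getD_eq_getElem dL ' ' hjlen]; exact hjget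
  -- split dL at j
  set T := dL.take j with hT
  set r := dL.drop (j + 1) with hr
  have hTlen : T.length = j := by simp [hT]; omega
  have hsplit : dL = T ++ '(' :: r := by
    conv_lhs => rw [← List.take_append_drop j dL]
    rw [List.drop_eq_getElem_cons hjlen, hjget']
  rcases hS1 : runS 0 [] none T with ⟨S₁, m₁⟩
  -- entries of S₁ are < j
  have hS1small : ∀ y ∈ S₁, y < j := by
    intro y hy
    have : (runS 0 [] none T).1 = (runE 0 [] 0 T).1 := by
      simpa using runE_runS T 0 [] 0 [] none
    rw [hS1] at this
    have hy' : y ∈ (runE 0 [] 0 T).1 := by rw [← this]; exact hy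
    rcases runE_mem T 0 [] 0 y hy' with h' | h'
    · simp at h'
    · have := h'.2.1; rw [hTlen] at this; omega
  -- run dL to its end through the split
  have hmain : (runS (j + 1) (j :: S₁) m₁ r).1 = j :: S' := by
    have := runS_append T ('(' :: r) 0 [] none
    rw [← hsplit, hS1] at this
    rw [this] at h
    simpa [runS, hTlen] using h
  rcases hYq : runE (j + 1) [] 0 r with ⟨Y, q⟩
  have hYbig : ∀ y ∈ Y, j + 1 ≤ y := by
    intro y hy
    rcases runE_mem r (j + 1) [] 0 y (by rw [hYq]; exact hy) with h' | h'
    · simp at h'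
    · exact h'.1
  have hYdrop : Y ++ (j :: S₁).drop q = j :: S' := by
    have := runE_runS r (j + 1) [] 0 (j :: S₁) m₁
    rw [hYq] at this
    simp at this
    rw [← this]
    exact hmain
  -- q = 0 and Y = []
  have hq0 : q = 0 ∧ Y = [] ∧ S₁ = S' := by
    rcases q with _ | q''
    · rcases Y with _ | ⟨y, Y'⟩
      · simp at hYdrop
        exact ⟨rfl, rfl, hYdrop⟩
      · exfalso
        simp at hYdrop
        have := hYbig y List.mem_cons_self
        omega
    · exfalso
      have hd : (j :: S₁).drop (q'' + 1) = S₁.drop q'' := by simp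
      rw [hd] at hYdrop
      rcases Y with _ | ⟨y, Y'⟩
      · simp at hYdrop
        have : j ∈ S₁ := List.mem_of_mem_drop (i := q'') (by rw [hYdrop]; exact List.mem_cons_self)
        exact absurd (hS1small j this) (by omega)
      · simp at hYdrop
        have := hYbig y List.mem_cons_self
        omega
  obtain ⟨rfl, rfl, rfl⟩ := hq0
  -- now evaluate the run over the new string
  have htake : (dL ++ [')']).take j = T := List.take_append_of_le_length (by omega)
  have hdrop : (dL ++ [')']).drop j = '(' :: (r ++ [')']) := by
    rw [List.drop_append_of_le_length (by omega)]
    conv_lhs => rw [hsplit]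
    rw [List.drop_append_of_le_length (by rw [hTlen])]
    simp [hTlen]
  rw [htake, hdrop]
  have hshape : T ++ '(' :: ('(' :: (r ++ [')'])) ++ ['§', '_', ')'] =
      T ++ '(' :: '(' :: (r ++ [')', '§', '_', ')']) := by simp
  calc runS 0 [] none (T ++ '(' :: ('(' :: (r ++ [')'])) ++ ['§', '_', ')'])
      = runS 0 [] none (T ++ '(' :: '(' :: (r ++ [')', '§', '_', ')'])) := by rw [hshape]
    _ = runS (j + 1 + 1) ((j + 1) :: j :: S₁) m₁ (r ++ [')', '§', '_', ')']) := by
        rw [runS_append T _ 0 [] none, hS1]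
        simp [runS, hTlen]
    _ = (S₁, some j) := by
        rw [runS_append]
        have hP : (runS (j + 1 + 1) ((j + 1) :: j :: S₁) m₁ r).1 = (j + 1) :: j :: S₁ := by
          have hsh := runE_shift r (j + 1) [] 0
          rw [hYq] at hsh
          simp only [List.map_nil] at hsh
          have := runE_runS r (j + 1 + 1) [] 0 ((j + 1) :: j :: S₁) m₁
          rw [hsh] at this
          simpa using this
        rw [hP]
        simp [runS]

-- the coupling invariant between B's state and A's output
def CoupInv (st : List Char × List Nat × Option Nat) (out : List Char) : Prop :=
  st.1 = out ∧ st.2.1 = (runS 0 [] none out).1 ∧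
    (out.getLast? = some ')' → st.2.2 = (runS 0 [] none out).2)

-- appending one ordinary character through bPut preserves the coupling
lemma inv_put1 (out : List Char) (ml : Option Nat) (c : Char) :
    CoupInv (bPut (out, (runS 0 [] none out).1, ml) [c]) (out ++ [c]) := by
  have hb := bPut_spec [c] out (runS 0 [] none out).1 ml
  have ha := runS_append out [c] 0 [] none
  simp only [Nat.zero_add] at ha
  refine ⟨by rw [hb], ?_, ?_⟩
  · rw [hb, ha]
    by_cases h1 : c = '('
    · simp [runS, h1]
    · by_cases h2 : c = ')'
      · rcases hS : (runS 0 [] none out).1 with _ | ⟨t, S'⟩ <;> simp [runS, h1, h2, hS]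
      · simp [runS, h1, h2]
  · intro hl
    have hc : c = ')' := by
      rw [List.getLast?_concat] at hl
      exact (Option.some_inj.mp hl)
    subst hc
    rw [hb, ha]
    rcases hS : (runS 0 [] none out).1 with _ | ⟨t, S'⟩ <;> simp [runS, hS]

lemma getLast?_concat_self (out : List Char) (c : Char) (h : out.getLast? = some c) :
    out = out.dropLast ++ [c] := by
  obtain ⟨l', rfl⟩ := List.getLast?_eq_some_iff.mp h
  simp

lemma main_lemma : ∀ (rest : List Char) (prev : Option Char) (out : List Char)
    (st : List Char × List Nat × Option Nat), CoupInv st out →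
    (bLoop rest prev st).1 = aLoop rest prev out := by
  intro rest
  induction rest with
  | nil => intro prev out st hinv; simpa [bLoop, aLoop] using hinv.1
  | cons c rest ih =>
    intro prev out st hinv
    obtain ⟨ob, stack, ml⟩ := st
    obtain ⟨h1, h2, h3⟩ := hinv
    simp only at h1 h2 h3
    rw [h1]
    by_cases hc : c = '?' ∧ prev ≠ some '\\'
    · obtain ⟨hc1, hc2⟩ := hc
      subst hc1
      by_cases hlast : out.getLast? = some ')'
      · -- A's ')'-ending branch
        obtain ⟨dL, rfl⟩ : ∃ dl, out = dl ++ [')'] :=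
          ⟨out.dropLast, getLast?_concat_self out ')' hlast⟩
        have hcanon : runS 0 [] none (dL ++ [')']) =
            runS dL.length (runS 0 [] none dL).1 (runS 0 [] none dL).2 [')'] := by
          simpa using runS_append dL [')'] 0 [] none
        rcases hSdL : (runS 0 [] none dL).1 with _ | ⟨t, S'⟩
        · -- no matching '(': A wraps the single ')' like a one-char operand
          have hml : ml = none := by
            rw [h3 hlast, hcanon, hSdL]; simp [runS]
          have hstk : stack = [] := by rw [h2, hcanon, hSdL]; simp [runS]
          subst hml; subst hstk
          have hr : aScan (dL ++ [')']) 1 dL.length = -1 := by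
            rw [aScan_prefix _ _ _ _ (le_refl _)]
            have := aScan_eq dL 0
            rw [hSdL] at this
            norm_num at this
            exact this
          have hA : aLoop ('?' :: rest) prev (dL ++ [')']) = aLoop rest (some '?')
              (dL ++ ['(', ')', '§', '_', ')']) := by
            have hop : PySem.List.slice (dL ++ [')']) (some (-1)) none = [')'] := by
              rw [show ((-1 : Int)) = -((1 : Nat) : Int) by norm_num,
                PySem.List.slice_from_neg_natCast _ 1 (by omega)]
              simp
            have hkept : PySem.List.slice (dL ++ [')']) none (some (-1)) = dL := by
              rw [show ((-1 : Int)) = -((1 : Nat) : Int) by norm_num,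
                PySem.List.slice_to_neg_natCast _ 1 (by omega)]
              simp
            simp [aLoop, hc2, hr, hop, hkept]
          have hB : bLoop ('?' :: rest) prev (dL ++ [')'], [], none) =
              bLoop rest (some '?') (bPut (dL, [], none) ['(', ')', '§', '_', ')']) := by
            simp [bLoop, hc2]
          rw [hA, hB]
          apply ih
          have hput := bPut_spec ['(', ')', '§', '_', ')'] dL [] none
          have hcan2 := runS_append dL ['(', ')', '§', '_', ')'] 0 [] none
          simp only [Nat.zero_add] at hcan2
          have hirrel : runS dL.length [] (none : Option Nat) ['(', ')', '§', '_', ')'] =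
              runS dL.length [] (runS 0 [] none dL).2 ['(', ')', '§', '_', ')'] := by
            apply runS_ml_irrel; simp
          rw [hirrel] at hput
          refine ⟨by simp [hput], ?_, fun _ => ?_⟩
          · rw [hput, hcan2, hSdL]
          · rw [hput, hcan2, hSdL]
        · -- matching '(' at t: the group wrap
          have hml : ml = some t := by
            rw [h3 hlast, hcanon, hSdL]; simp [runS]
          have hstk : stack = S' := by rw [h2, hcanon, hSdL]; simp [runS]
          have hr : aScan (dL ++ [')']) 1 dL.length = (t : Int) := by
            rw [aScan_prefix _ _ _ _ (le_refl _)]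
            have := aScan_eq dL 0
            rw [hSdL] at this
            norm_num at this
            exact this
          have hA : aLoop ('?' :: rest) prev (dL ++ [')']) = aLoop rest (some '?')
              ((dL ++ [')']).take t ++ '(' :: (dL ++ [')']).drop t ++ ['§', '_', ')']) := by
            simp [aLoop, hc2, hr, PySem.List.slice_from_natCast, PySem.List.slice_to_natCast]
          have hB : bLoop ('?' :: rest) prev (dL ++ [')'], stack, ml) =
              bLoop rest (some '?') ((dL ++ [')']).take t ++ '(' :: (dL ++ [')']).drop t ++
                ['§', '_', ')'], stack, some t) := by
            simp [bLoop, hc2, hml]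
          rw [hA, hB]
          apply ih
          have hgrp := group_lemma dL t S' hSdL
          exact ⟨rfl, by rw [hgrp, hstk], fun _ => by rw [hgrp]⟩
      · by_cases hne : out = []
        · -- empty output: bare "§_"
          subst hne
          have hstk : stack = [] := by simpa [runS] using h2
          subst hstk
          have hA : aLoop ('?' :: rest) prev [] = aLoop rest (some '?') ['§', '_'] := by
            simp [aLoop, hc2]
          have hB : bLoop ('?' :: rest) prev ([], [], ml) =
              bLoop rest (some '?') (bPut ([], [], ml) ['§', '_']) := by
            simp [bLoop, hc2]
          rw [hA, hB]
          apply ih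
          have hput := bPut_spec ['§', '_'] [] [] ml
          exact ⟨by simp [hput], by simp [hput, runS], fun h => by simp at h⟩
        · -- single-character operand
          rcases hg : out.getLast? with _ | c0
          · exact absurd (List.getLast?_eq_none_iff.mp hg) hne
          have hc0 : c0 ≠ ')' := fun h => hlast (h ▸ hg)
          obtain ⟨dL, rfl⟩ : ∃ dl, out = dl ++ [c0] :=
            ⟨out.dropLast, getLast?_concat_self out c0 hg⟩
          have hcanon : runS 0 [] none (dL ++ [c0]) =
              runS dL.length (runS 0 [] none dL).1 (runS 0 [] none dL).2 [c0] := by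
            simpa using runS_append dL [c0] 0 [] none
          have hstk' : (if c0 = '(' then stack.tail else stack) = (runS 0 [] none dL).1 := by
            by_cases h0 : c0 = '('
            · rw [if_pos h0, h2, hcanon, h0]; simp [runS]
            · rw [if_neg h0, h2, hcanon]; simp [runS, h0, hc0]
          have hA : aLoop ('?' :: rest) prev (dL ++ [c0]) = aLoop rest (some '?')
              (dL ++ ['(', c0, '§', '_', ')']) := by
            simp [aLoop, hc2, hc0]
          have hB : bLoop ('?' :: rest) prev (dL ++ [c0], stack, ml) =
              bLoop rest (some '?') (bPut (dL, if c0 = '(' then stack.tail else stack,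
                ml) ['(', c0, '§', '_', ')']) := by
            simp [bLoop, hc2, hc0]
          rw [hA, hB, hstk']
          apply ih
          have hput := bPut_spec ['(', c0, '§', '_', ')'] dL (runS 0 [] none dL).1 ml
          have hcan2 := runS_append dL ['(', c0, '§', '_', ')'] 0 [] none
          simp only [Nat.zero_add] at hcan2
          have hirrel : runS dL.length (runS 0 [] none dL).1 ml ['(', c0, '§', '_', ')'] =
              runS dL.length (runS 0 [] none dL).1 (runS 0 [] none dL).2
                ['(', c0, '§', '_', ')'] := by
            apply runS_ml_irrel; simp
          rw [hirrel] at hput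
          exact ⟨by simp [hput], by rw [hput, hcan2], fun _ => by rw [hput, hcan2]⟩
    · -- ordinary character (or escaped '?')
      have hB : bLoop (c :: rest) prev (out, stack, ml) =
          bLoop rest (some c) (bPut (out, stack, ml) [c]) := by
        simp only [bLoop, if_neg hc]
      have hA : aLoop (c :: rest) prev out = aLoop rest (some c) (out ++ [c]) := by
        by_cases hq : c = '?'
        · subst hq
          have hp : prev = some '\\' := by
            by_contra h; exact hc ⟨rfl, h⟩
          simp [aLoop, hp]
        · simp [aLoop, hq]
      rw [hA, hB]
      apply ih
      rw [h2]
      exact inv_put1 out ml c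

-- ===== VERDICT (by name: the statement is the Claim_ definition above) =====
theorem convert_optional_operator_spec : Claim_equal_convert_optional_operator := by
  intro expr _
  unfold Spec_convert_optional_operator convert_optional_operator convert_optional_operator_alt
  exact congrArg String.mk (main_lemma expr.toList none [] ([], [], none) ⟨rfl, rfl, fun h => by simp at h⟩).symm
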